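-- pv_equiv track=rewrite | github.com/PichuginIlya/homework_for_students | 3_functions/1_phone_text_code/decode/decode.py | decode_numbers
-- ===== SOURCE A (Python) =====
-- def decode_numbers(numbers: str) -> str | None:
--     keypad = {
--         '1': ['.', ',', '?', '!', ':', ';'],
--         '2': ['а', 'б', 'в', 'г'],
--         '3': ['д', 'е', 'ж', 'з'],
--         '4': ['и', 'й', 'к', 'л'],
--         '5': ['м', 'н', 'о', 'п'],
--         '6': ['р', 'с', 'т', 'у'],
--         '7': ['ф', 'х', 'ц', 'ч'],
--         '8': ['ш', 'щ', 'ъ', 'ы'],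
--         '9': ['ь', 'э', 'ю', 'я'],
--         '0': [' ']
--     }
--
--     groups = numbers.split()
--
--     for group in groups:
--         if not group.isdigit() or len(group) > 6 or len(group) == 0 or len(set(group)) != 1:
--             return None
--
--     result = []
--     for group in groups:
--         digit = group[0]
--         count = len(group)
--         if digit in keypad and count <= len(keypad[digit]):
--             result.append(keypad[digit][count - 1])
--         else:
--             return None
--
--     return ''.join(result)
-- ===== SOURCE B (Python) =====
-- # One flat literal table: every valid repeated-digit group maps directly to its letter.
-- _TABLE = {
--     '1': '.', '11': ',', '111': '?', '1111': '!', '11111': ':', '111111': ';',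
--     '2': 'а', '22': 'б', '222': 'в', '2222': 'г',
--     '3': 'д', '33': 'е', '333': 'ж', '3333': 'з',
--     '4': 'и', '44': 'й', '444': 'к', '4444': 'л',
--     '5': 'м', '55': 'н', '555': 'о', '5555': 'п',
--     '6': 'р', '66': 'с', '666': 'т', '6666': 'у',
--     '7': 'ф', '77': 'х', '777': 'ц', '7777': 'ч',
--     '8': 'ш', '88': 'щ', '888': 'ъ', '8888': 'ы',
--     '9': 'ь', '99': 'э', '999': 'ю', '9999': 'я',
--     '0': ' ',
-- }
--
--
-- def decode_numbers(numbers: str) -> str | None: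
--     groups = numbers.split()
--     decoded = [_TABLE[g] for g in groups if g in _TABLE]
--     if len(decoded) != len(groups):
--         return None
--     return ''.join(decoded)
-- ===== Notes on version B (the rewrite author's own statement) =====
-- stated objective: simpler
-- what changed: Replaces A's keypad dict plus two loops of explicit validity checks (isdigit, length bounds, set-uniformity, keypad bounds, early return) by one flat literal dict from each valid repeated-digit group to its letter, a comprehension keeping the hits, and a single length comparison to detect any invalid group.
import Mathlib
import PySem

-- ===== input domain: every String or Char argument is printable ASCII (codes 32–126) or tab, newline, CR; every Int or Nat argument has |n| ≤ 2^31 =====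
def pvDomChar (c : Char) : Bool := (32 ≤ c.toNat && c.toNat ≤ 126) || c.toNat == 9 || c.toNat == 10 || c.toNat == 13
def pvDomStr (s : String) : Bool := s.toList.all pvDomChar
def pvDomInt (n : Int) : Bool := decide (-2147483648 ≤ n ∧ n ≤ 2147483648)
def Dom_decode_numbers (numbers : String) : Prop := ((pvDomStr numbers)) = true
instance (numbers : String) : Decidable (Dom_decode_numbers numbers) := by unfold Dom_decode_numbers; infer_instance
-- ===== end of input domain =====

-- B replaces A's keypad dict and two checking loops by one flat literal table from each valid
-- repeated-digit group to its letter, keeping the hits and comparing counts; objective: simpler.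

-- ===== PORT A =====
-- the keypad dict literal (distinct keys)
def pvKeypadA : PySem.Dict Char (List String) := PySem.Dict.ofList
  [ ('1', [".", ",", "?", "!", ":", ";"]),
    ('2', ["а", "б", "в", "г"]),
    ('3', ["д", "е", "ж", "з"]),
    ('4', ["и", "й", "к", "л"]),
    ('5', ["м", "н", "о", "п"]),
    ('6', ["р", "с", "т", "у"]),
    ('7', ["ф", "х", "ц", "ч"]),
    ('8', ["ш", "щ", "ъ", "ы"]),
    ('9', ["ь", "э", "ю", "я"]),
    ('0', [" "]) ]

-- the first loop's pass condition: NOT (not isdigit or len > 6 or len == 0 or len(set) != 1)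
def pvCheckA (g : String) : Bool :=
  PySem.Str.strIsdigit g && !(decide (PySem.Str.len g > 6)) && !(PySem.Str.len g == 0)
    && (PySem.Set.len (PySem.Set.ofList g.toList) == 1)

-- the second loop's body for one group: keypad[digit][count-1], or None
def pvStepA (g : String) : Option String :=
  match PySem.Str.pyGet? g 0 with    -- group[0]; none (IndexError) is unreachable: the first loop rejected len == 0
  | none => none
  | some digit =>
    if PySem.Dict.contains pvKeypadA digit
        && decide (PySem.Str.len g ≤ ((PySem.Dict.getD pvKeypadA digit []).length : Int)) then
      PySem.List.pyGet? (PySem.Dict.getD pvKeypadA digit []) (PySem.Str.len g - 1)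
    else none

-- the second loop: result list built group by group, early None on failure
def pvGoA : List String → Option (List String)
  | [] => some []
  | g :: gs =>
    match pvStepA g with
    | none => none
    | some letter => (pvGoA gs).map (letter :: ·)

def decode_numbers (numbers : String) : Option String :=
  let groups := PySem.Str.split₀ numbers
  if groups.all pvCheckA then
    (pvGoA groups).map (fun result => PySem.Str.join "" result)
  else none

-- ===== PORT B =====
-- the flat literal table _TABLE: every valid repeated-digit group -> its letter
def pvTableB : PySem.Dict String String := PySem.Dict.ofList
  [ ("1", "."), ("11", ","), ("111", "?"), ("1111", "!"), ("11111", ":"), ("111111", ";"),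
    ("2", "а"), ("22", "б"), ("222", "в"), ("2222", "г"),
    ("3", "д"), ("33", "е"), ("333", "ж"), ("3333", "з"),
    ("4", "и"), ("44", "й"), ("444", "к"), ("4444", "л"),
    ("5", "м"), ("55", "н"), ("555", "о"), ("5555", "п"),
    ("6", "р"), ("66", "с"), ("666", "т"), ("6666", "у"),
    ("7", "ф"), ("77", "х"), ("777", "ц"), ("7777", "ч"),
    ("8", "ш"), ("88", "щ"), ("888", "ъ"), ("8888", "ы"),
    ("9", "ь"), ("99", "э"), ("999", "ю"), ("9999", "я"),
    ("0", " ") ]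

def decode_numbers_alt (numbers : String) : Option String :=
  let groups := PySem.Str.split₀ numbers
  -- [_TABLE[g] for g in groups if g in _TABLE]: keep the successful lookups
  let decoded := groups.filterMap (fun g => PySem.Dict.get? pvTableB g)
  if decoded.length = groups.length then some (PySem.Str.join "" decoded) else none

-- ===== PRECONDITION & SPEC =====
def Spec_decode_numbers (numbers : String) (out : Option String) : Prop := out = decode_numbers_alt numbers
instance (numbers : String) (out : Option String) : Decidable (Spec_decode_numbers numbers out) := by unfold Spec_decode_numbers; infer_instance

-- ===== CLAIM (what is proved, stated in full; the proofs are below) =====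
def Claim_equal_decode_numbers : Prop := ∀ (numbers : String), Dom_decode_numbers numbers → Spec_decode_numbers numbers (decode_numbers numbers)

-- ===== LEMMAS AND PROOFS =====
set_option maxRecDepth 100000

-- a Char is determined by its code point
theorem pv_char_eq {a b : Char} (h : a.toNat = b.toNat) : a = b :=
  Char.ext (UInt32.toNat_inj.mp h)

-- the keys of B's table
theorem pv_table_keys : (PySem.Dict.keys pvTableB) =
    ["1", "11", "111", "1111", "11111", "111111",
     "2", "22", "222", "2222", "3", "33", "333", "3333",
     "4", "44", "444", "4444", "5", "55", "555", "5555",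
     "6", "66", "666", "6666", "7", "77", "777", "7777",
     "8", "88", "888", "8888", "9", "99", "999", "9999", "0"] := by decide

-- a group passing A's first-loop checks is a replicate of a digit; on those the
-- second-loop body agrees with B's table lookup (finitely many cases)
theorem pv_valid (g : String) (hc : pvCheckA g = true) :
    pvStepA g = PySem.Dict.get? pvTableB g := by
  unfold pvCheckA at hc
  simp only [Bool.and_eq_true, beq_iff_eq, Bool.not_eq_true', decide_eq_false_iff_not,
    not_lt, PySem.Str.len_eq] at hc
  obtain ⟨⟨⟨hdig, hlen6⟩, hlen0⟩, hset⟩ := hc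
  -- uniformity: g.toList is a replicate of some character a ∈ g.toList
  have hone : (PySem.Set.ofList g.toList).length = 1 := by
    have : PySem.Set.len (PySem.Set.ofList g.toList) = 1 := hset
    unfold PySem.Set.len at this; omega
  obtain ⟨a, ha⟩ := List.length_eq_one_iff.mp hone
  have hmem : a ∈ g.toList := by
    have : a ∈ PySem.Set.ofList g.toList := by rw [ha]; exact List.mem_singleton_self a
    exact (PySem.Set.mem_ofList g.toList a).mp this
  have hall : ∀ x ∈ g.toList, x = a := by
    intro x hx
    have : x ∈ PySem.Set.ofList g.toList := (PySem.Set.mem_ofList g.toList x).mpr hx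
    rw [ha] at this; simpa using this
  have hrep : g.toList = List.replicate g.toList.length a := List.eq_replicate_of_mem hall
  -- a is a decimal digit
  have hdig' : PySem.Chars.isdigit a = true := by
    simp only [PySem.Str.strIsdigit_eq, PySem.Chars.strIsdigit, Bool.and_eq_true,
      List.all_eq_true] at hdig
    exact hdig.2 a hmem
  have hcd : 48 ≤ a.toNat ∧ a.toNat ≤ 57 := by
    simp only [PySem.Chars.isdigit, Bool.and_eq_true, decide_eq_true_eq] at hdig'
    exact ⟨hdig'.1, hdig'.2⟩
  -- length bounds
  have hn1 : 1 ≤ g.toList.length := by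
    have hne : (g.toList.length : Int) ≠ 0 := by simpa using hlen0
    omega
  have hn6 : g.toList.length ≤ 6 := by exact_mod_cast hlen6
  -- rewrite g as the literal replicate and enumerate the 60 (digit, length) cases
  have hg : g = String.ofList (List.replicate g.toList.length a) := by
    conv_lhs => rw [← String.ofList_toList (s := g)]
    rw [← hrep]
  rw [hg]
  have hncase : g.toList.length = 1 ∨ g.toList.length = 2 ∨ g.toList.length = 3 ∨
      g.toList.length = 4 ∨ g.toList.length = 5 ∨ g.toList.length = 6 := by omega
  have hacase : a.toNat = 48 ∨ a.toNat = 49 ∨ a.toNat = 50 ∨ a.toNat = 51 ∨ a.toNat = 52 ∨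
      a.toNat = 53 ∨ a.toNat = 54 ∨ a.toNat = 55 ∨ a.toNat = 56 ∨ a.toNat = 57 := by omega
  have hach : a = '0' ∨ a = '1' ∨ a = '2' ∨ a = '3' ∨ a = '4' ∨
      a = '5' ∨ a = '6' ∨ a = '7' ∨ a = '8' ∨ a = '9' := by
    rcases hacase with h | h | h | h | h | h | h | h | h | h <;>
      [exact Or.inl (pv_char_eq h); exact Or.inr (Or.inl (pv_char_eq h));
       exact Or.inr (Or.inr (Or.inl (pv_char_eq h)));
       exact Or.inr (Or.inr (Or.inr (Or.inl (pv_char_eq h))));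
       exact Or.inr (Or.inr (Or.inr (Or.inr (Or.inl (pv_char_eq h)))));
       exact Or.inr (Or.inr (Or.inr (Or.inr (Or.inr (Or.inl (pv_char_eq h))))));
       exact Or.inr (Or.inr (Or.inr (Or.inr (Or.inr (Or.inr (Or.inl (pv_char_eq h)))))));
       exact Or.inr (Or.inr (Or.inr (Or.inr (Or.inr (Or.inr (Or.inr (Or.inl (pv_char_eq h))))))));
       exact Or.inr (Or.inr (Or.inr (Or.inr (Or.inr (Or.inr (Or.inr (Or.inr (Or.inl (pv_char_eq h)))))))));
       exact Or.inr (Or.inr (Or.inr (Or.inr (Or.inr (Or.inr (Or.inr (Or.inr (Or.inr (pv_char_eq h)))))))))]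
  rcases hncase with h | h | h | h | h | h <;> rw [h] <;>
    rcases hach with h' | h' | h' | h' | h' | h' | h' | h' | h' | h' <;> rw [h'] <;> decide

-- a group failing A's checks is not a key of B's table
theorem pv_invalid (g : String) (hc : pvCheckA g = false) :
    PySem.Dict.get? pvTableB g = none := by
  cases h : PySem.Dict.get? pvTableB g with
  | none => rfl
  | some letter =>
    exfalso
    have hk : g ∈ PySem.Dict.keys pvTableB :=
      PySem.Dict.mem_keys_of_mem_items _ (PySem.Dict.mem_items_of_get?_eq_some _ h)
    rw [pv_table_keys] at hk
    fin_cases hk <;> exact absurd hc (by decide)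

theorem pvGoA_cons (g : String) (gs : List String) :
    pvGoA (g :: gs) = match pvStepA g with
      | none => none
      | some letter => (pvGoA gs).map (letter :: ·) := rfl

-- the whole A pipeline on a group list equals B's filterMap-and-count formulation
theorem pv_loop (gs : List String) :
    (if gs.all pvCheckA then pvGoA gs else none) =
      (if (gs.filterMap (fun g => PySem.Dict.get? pvTableB g)).length = gs.length then
        some (gs.filterMap (fun g => PySem.Dict.get? pvTableB g)) else none) := by
  induction gs with
  | nil => rfl
  | cons g gs ih =>
    cases hf : PySem.Dict.get? pvTableB g with
    | none =>
      have hlen : (gs.filterMap (fun g => PySem.Dict.get? pvTableB g)).length ≤ gs.length :=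
        List.length_filterMap_le _ _
      have hrhs : ¬ (((g :: gs).filterMap (fun g => PySem.Dict.get? pvTableB g)).length
          = (g :: gs).length) := by
        rw [List.filterMap_cons, hf]; simp only [List.length_cons]; omega
      rw [if_neg hrhs]
      cases hc : pvCheckA g with
      | false => simp [List.all_cons, hc]
      | true =>
        have hs : pvStepA g = none := by rw [pv_valid g hc, hf]
        simp [List.all_cons, hc, pvGoA_cons, hs]
    | some a =>
      have hc : pvCheckA g = true := by
        by_contra hfalse
        have hcf : pvCheckA g = false := by revert hfalse; cases pvCheckA g <;> simp
        rw [pv_invalid g hcf] at hf; simp at hf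
      have hs : pvStepA g = some a := by rw [pv_valid g hc, hf]
      rw [List.filterMap_cons, hf]
      simp only [List.all_cons, hc, Bool.true_and, pvGoA_cons, hs, List.length_cons]
      have hmap : (if gs.all pvCheckA then pvGoA gs else none).map (a :: ·) =
          (if gs.all pvCheckA then (pvGoA gs).map (a :: ·) else none) := by
        cases gs.all pvCheckA <;> simp
      rw [← hmap, ih]
      by_cases h : (gs.filterMap (fun g => PySem.Dict.get? pvTableB g)).length = gs.length
      · rw [if_pos h, if_pos (by omega)]; rfl
      · rw [if_neg h, if_neg (by omega)]; rfl

-- ===== VERDICT (by name: the statement is the Claim_ definition above) =====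
theorem decode_numbers_spec : Claim_equal_decode_numbers := by
  intro numbers _
  unfold Spec_decode_numbers decode_numbers decode_numbers_alt
  have h := pv_loop (PySem.Str.split₀ numbers)
  by_cases hl : ((PySem.Str.split₀ numbers).filterMap
      (fun g => PySem.Dict.get? pvTableB g)).length = (PySem.Str.split₀ numbers).length
  · simp only [hl, if_pos] at h ⊢
    by_cases ha : (PySem.Str.split₀ numbers).all pvCheckA
    · rw [if_pos ha] at h ⊢; rw [h]; rfl
    · rw [if_neg ha] at h; exact absurd h.symm (by simp)
  · simp only [hl, if_neg, ite_eq_right_iff] at h ⊢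
    by_cases ha : (PySem.Str.split₀ numbers).all pvCheckA
    · rw [if_pos ha] at h; simp [ha, h]
    · simp [ha]
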